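-- pv_equiv track=rewrite | github.com/braineo/genshin-wish | legacy/genshin-wish-history.py | get_rank_statistics
-- ===== SOURCE A (Python) =====
-- def get_rank_statistics(wishList):
--     statistics = {
--         "total": len(list(wishList)),
--     }
--     for rank in [3, 4, 5]:
--         statistics["%sstar" % rank] = len(
--             list(filter(lambda x: x["rank"] == rank, wishList))
--         )
--
--     return statistics
-- ===== SOURCE B (Python) =====
-- def get_rank_statistics(wishList):
--     # One pass over wishList with plain counters instead of A's four traversals.
--     total = 0
--     s3 = 0
--     s4 = 0
--     s5 = 0
--     for x in wishList:
--         total += 1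
--         r = x["rank"]
--         if r == 3:
--             s3 += 1
--         elif r == 4:
--             s4 += 1
--         elif r == 5:
--             s5 += 1
--     return {"total": total, "3star": s3, "4star": s4, "5star": s5}
-- ===== Notes on version B (the rewrite author's own statement) =====
-- stated objective: alternative
-- what changed: A makes four traversals (len(list(...)) plus one filter scan per rank); B makes a single pass accumulating four integer counters and builds the dict once at the end.
import Mathlib
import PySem

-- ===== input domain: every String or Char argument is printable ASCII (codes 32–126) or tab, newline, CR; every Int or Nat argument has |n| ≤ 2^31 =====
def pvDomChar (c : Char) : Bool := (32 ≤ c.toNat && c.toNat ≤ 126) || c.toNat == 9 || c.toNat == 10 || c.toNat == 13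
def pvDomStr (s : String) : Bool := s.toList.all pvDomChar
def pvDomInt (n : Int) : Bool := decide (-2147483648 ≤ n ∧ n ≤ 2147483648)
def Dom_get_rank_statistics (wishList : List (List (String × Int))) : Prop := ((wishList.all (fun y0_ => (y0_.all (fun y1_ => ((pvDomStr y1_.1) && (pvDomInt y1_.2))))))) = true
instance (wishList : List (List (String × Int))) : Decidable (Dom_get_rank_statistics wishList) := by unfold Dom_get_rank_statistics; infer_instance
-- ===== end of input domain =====

-- B replaces A's four traversals (len + three filter scans) by one pass with four counters; same dict, same key order.
-- Pre_ excludes wish entries without a "rank" key, on which both Pythons raise KeyError.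


-- ===== PORT A =====
-- x["rank"] is ported as (Dict.ofList x).getD "rank" 0; under Pre_ the key is present, so the
-- default is never used (where it would be, Python raises KeyError and the input is outside Pre_).
-- "%sstar" % rank is str(rank) + "star".
def get_rank_statistics (wishList : List (List (String × Int))) : List (String × Int) :=
  let statistics : PySem.Dict String Int :=
    PySem.Dict.insert PySem.Dict.empty "total" (wishList.length : Int)
  (([3, 4, 5] : List Int).foldl (fun st rank =>
      st.insert (PySem.Int.toStr rank ++ "star")
        ((wishList.filter (fun x => (PySem.Dict.ofList x).getD "rank" 0 == rank)).length : Int))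
    statistics).items

-- ===== PORT B =====
def get_rank_statistics_alt (wishList : List (List (String × Int))) : List (String × Int) :=
  let acc : Int × Int × Int × Int :=
    wishList.foldl (fun a x =>
      let t := a.1 + 1
      let r := (PySem.Dict.ofList x).getD "rank" 0
      if r == 3 then (t, a.2.1 + 1, a.2.2.1, a.2.2.2)
      else if r == 4 then (t, a.2.1, a.2.2.1 + 1, a.2.2.2)
      else if r == 5 then (t, a.2.1, a.2.2.1, a.2.2.2 + 1)
      else (t, a.2.1, a.2.2.1, a.2.2.2)) (0, 0, 0, 0)
  [("total", acc.1), ("3star", acc.2.1), ("4star", acc.2.2.1), ("5star", acc.2.2.2)]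

-- ===== PRECONDITION & SPEC =====
-- Pre_: every wish has a "rank" key; on a wish without it both A and B raise KeyError.
def Pre_get_rank_statistics (wishList : List (List (String × Int))) : Prop :=
  (wishList.all (fun x => (PySem.Dict.ofList x).contains "rank")) = true
instance (wishList : List (List (String × Int))) : Decidable (Pre_get_rank_statistics wishList) := by
  unfold Pre_get_rank_statistics; infer_instance
def pvWitness_get_rank_statistics : (List (List (String × Int))) :=
  [[("rank", 3)], [("rank", 5), ("id", 1)]]
def Spec_get_rank_statistics (wishList : List (List (String × Int))) (out : List (String × Int)) : Prop := out = get_rank_statistics_alt wishList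
instance (wishList : List (List (String × Int))) (out : List (String × Int)) : Decidable (Spec_get_rank_statistics wishList out) := by unfold Spec_get_rank_statistics; infer_instance

-- ===== CLAIM (what is proved, stated in full; the proofs are below) =====
def Claim_equal_get_rank_statistics : Prop := ∀ (wishList : List (List (String × Int))), Dom_get_rank_statistics wishList → Pre_get_rank_statistics wishList → Spec_get_rank_statistics wishList (get_rank_statistics wishList)

-- ===== LEMMAS AND PROOFS =====

-- the rank of a wish, as both ports read it
def pvRank (x : List (String × Int)) : Int := (PySem.Dict.ofList x).getD "rank" 0

-- B's loop computes (start + length, counts of ranks 3/4/5 added on)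
theorem pvLoopB (wl : List (List (String × Int))) (a : Int × Int × Int × Int) :
    wl.foldl (fun a x =>
      let t := a.1 + 1
      let r := pvRank x
      if r == 3 then (t, a.2.1 + 1, a.2.2.1, a.2.2.2)
      else if r == 4 then (t, a.2.1, a.2.2.1 + 1, a.2.2.2)
      else if r == 5 then (t, a.2.1, a.2.2.1, a.2.2.2 + 1)
      else (t, a.2.1, a.2.2.1, a.2.2.2)) a
    = (a.1 + wl.length,
       a.2.1 + (wl.filter (fun x => pvRank x == 3)).length,
       a.2.2.1 + (wl.filter (fun x => pvRank x == 4)).length,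
       a.2.2.2 + (wl.filter (fun x => pvRank x == 5)).length) := by
  induction wl generalizing a with
  | nil => simp
  | cons y ys ih =>
    simp only [List.foldl_cons, List.filter_cons]
    rw [ih]
    by_cases h3 : pvRank y = 3 <;> by_cases h4 : pvRank y = 4 <;> by_cases h5 : pvRank y = 5 <;>
      simp [h3, h4, h5, Prod.ext_iff] <;> omega

-- ===== VERDICT (by name: the statement is the Claim_ definition above) =====
theorem get_rank_statistics_spec : Claim_equal_get_rank_statistics := by
  intro wl _ _
  unfold Spec_get_rank_statistics get_rank_statistics get_rank_statistics_alt
  have key3 : PySem.Int.toStr 3 ++ "star" = "3star" := by decide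
  have key4 : PySem.Int.toStr 4 ++ "star" = "4star" := by decide
  have key5 : PySem.Int.toStr 5 ++ "star" = "5star" := by decide
  simp only [List.foldl_cons, List.foldl_nil, key3, key4, key5]
  rw [show (fun a x =>
      let t := a.1 + 1
      let r := (PySem.Dict.ofList x).getD "rank" 0
      if r == 3 then (t, a.2.1 + 1, a.2.2.1, a.2.2.2)
      else if r == 4 then (t, a.2.1, a.2.2.1 + 1, a.2.2.2)
      else if r == 5 then (t, a.2.1, a.2.2.1, a.2.2.2 + 1)
      else (t, a.2.1, a.2.2.1, a.2.2.2)) = (fun (a : Int × Int × Int × Int) x =>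
      let t := a.1 + 1
      let r := pvRank x
      if r == 3 then (t, a.2.1 + 1, a.2.2.1, a.2.2.2)
      else if r == 4 then (t, a.2.1, a.2.2.1 + 1, a.2.2.2)
      else if r == 5 then (t, a.2.1, a.2.2.1, a.2.2.2 + 1)
      else (t, a.2.1, a.2.2.1, a.2.2.2)) from rfl]
  rw [pvLoopB]
  simp [pvRank, PySem.Dict.insert, PySem.Dict.empty]
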